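-- pv_equiv track=rewrite | github.com/LemXiong/CPLL | utils/preprocess.py | generate_labels_dict
-- ===== SOURCE A (Python) =====
-- def generate_labels_dict(entity_types, way='bio'):
--     num = 0
--     labels_dict = {'O': num}
--     num += 1
--     for entity_type in entity_types:
--         if way == 'bio':
--             labels_dict.update({'B-'+entity_type: num})
--             num = num + 1
--             labels_dict.update({'I-' + entity_type: num})
--             num = num + 1
--         elif way == 'bioes':
--             labels_dict.update({'B-' + entity_type: num})
--             num = num + 1
--             labels_dict.update({'I-' + entity_type: num})
--             num = num + 1
--             labels_dict.update({'E-' + entity_type: num})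
--             num = num + 1
--             labels_dict.update({'S-' + entity_type: num})
--             num = num + 1
--         elif way == 'bmes':
--             labels_dict.update({'B-' + entity_type: num})
--             num = num + 1
--             labels_dict.update({'M-' + entity_type: num})
--             num = num + 1
--             labels_dict.update({'E-' + entity_type: num})
--             num = num + 1
--             labels_dict.update({'S-' + entity_type: num})
--             num = num + 1
--     return labels_dict
-- ===== SOURCE B (Python) =====
-- _PREFIX_CHARS = {'bio': 'BI', 'bioes': 'BIES', 'bmes': 'BMES'}
--
-- def generate_labels_dict(entity_types, way='bio'):
--     prefixes = _PREFIX_CHARS.get(way, '')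
--     keys = ['O'] + [p + '-' + t for t in entity_types for p in prefixes]
--     return {k: i for i, k in enumerate(keys)}
-- ===== Notes on version B (the rewrite author's own statement) =====
-- stated objective: simpler
-- what changed: Instead of a single pass that interleaves dict updates with a running counter inside a three-way branch, B stages the work: it first materialises the full key sequence ('O' plus prefix-entity products from a way->prefix-characters table) and then builds the dict in one shot from enumerate(keys), so the index is positional and no counter or per-way branch exists in any loop.
import Mathlib
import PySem

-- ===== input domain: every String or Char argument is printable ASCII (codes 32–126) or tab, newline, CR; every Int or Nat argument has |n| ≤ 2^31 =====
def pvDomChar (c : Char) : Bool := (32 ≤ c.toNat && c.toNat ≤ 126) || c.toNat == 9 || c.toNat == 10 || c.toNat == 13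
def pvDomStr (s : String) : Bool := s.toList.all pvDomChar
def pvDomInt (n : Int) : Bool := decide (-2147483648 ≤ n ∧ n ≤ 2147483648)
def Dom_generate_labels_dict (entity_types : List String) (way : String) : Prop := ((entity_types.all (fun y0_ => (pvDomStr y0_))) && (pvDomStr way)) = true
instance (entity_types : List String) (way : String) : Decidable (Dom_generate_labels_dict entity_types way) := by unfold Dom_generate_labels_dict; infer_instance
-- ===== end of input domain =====

-- B builds the whole label key sequence first and then indexes it positionally with enumerate; no running counter and no per-way branch inside a loop (objective: simpler).


-- ===== PORT A =====
def generate_labels_dict (entity_types : List String) (way : String) : List (String × Int) :=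
  -- num = 0; labels_dict = {'O': num}; num += 1
  let d0 : PySem.Dict String Int := PySem.Dict.empty.insert "O" 0
  -- for entity_type in entity_types: branch on way, update + num = num + 1 after each insert
  let st := entity_types.foldl (fun (st : PySem.Dict String Int × Int) entity_type =>
    if way == "bio" then
      let d := st.1.insert ("B-" ++ entity_type) st.2
      let num := st.2 + 1
      let d := d.insert ("I-" ++ entity_type) num
      (d, num + 1)
    else if way == "bioes" then
      let d := st.1.insert ("B-" ++ entity_type) st.2
      let num := st.2 + 1
      let d := d.insert ("I-" ++ entity_type) num
      let num := num + 1
      let d := d.insert ("E-" ++ entity_type) num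
      let num := num + 1
      let d := d.insert ("S-" ++ entity_type) num
      (d, num + 1)
    else if way == "bmes" then
      let d := st.1.insert ("B-" ++ entity_type) st.2
      let num := st.2 + 1
      let d := d.insert ("M-" ++ entity_type) num
      let num := num + 1
      let d := d.insert ("E-" ++ entity_type) num
      let num := num + 1
      let d := d.insert ("S-" ++ entity_type) num
      (d, num + 1)
    else st) (d0, 1)
  st.1.items

-- ===== PORT B =====
-- B: build the full key list ('O' then prefix-entity products), then one dict comprehension over enumerate(keys).
def pvPrefixChars : PySem.Dict String String :=
  PySem.Dict.ofList [("bio", "BI"), ("bioes", "BIES"), ("bmes", "BMES")]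

def generate_labels_dict_alt (entity_types : List String) (way : String) : List (String × Int) :=
  let prefixes := (pvPrefixChars.getD way "").toList
  let keys := "O" :: entity_types.flatMap (fun t => prefixes.map (fun p => String.singleton p ++ "-" ++ t))
  ((PySem.List.enumerate keys).foldl
    (fun (d : PySem.Dict String Int) p => d.insert p.2 p.1) PySem.Dict.empty).items

-- ===== PRECONDITION & SPEC =====
def Spec_generate_labels_dict (entity_types : List String) (way : String) (out : List (String × Int)) : Prop := out = generate_labels_dict_alt entity_types way
instance (entity_types : List String) (way : String) (out : List (String × Int)) : Decidable (Spec_generate_labels_dict entity_types way out) := by unfold Spec_generate_labels_dict; infer_instance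

-- ===== CLAIM (what is proved, stated in full; the proofs are below) =====
def Claim_equal_generate_labels_dict : Prop := ∀ (entity_types : List String) (way : String), Dom_generate_labels_dict entity_types way → Spec_generate_labels_dict entity_types way (generate_labels_dict entity_types way)

-- ===== LEMMAS AND PROOFS =====

-- A's per-entity block of inserts with a running counter equals B's fold over the enumerated flattened key list.
theorem pv_fold_eq (f : String → List String)
    (g : PySem.Dict String Int × Int → String → PySem.Dict String Int × Int)
    (hg : ∀ d num t, g (d, num) t =
      ((PySem.List.enumerate (f t) num).foldl (fun d p => d.insert p.2 p.1) d,
        num + ((f t).length : Int)))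
    (ets : List String) : ∀ (d : PySem.Dict String Int) (num : Int),
    ets.foldl g (d, num) =
      ((PySem.List.enumerate (ets.flatMap f) num).foldl (fun d p => d.insert p.2 p.1) d,
        num + ((ets.flatMap f).length : Int)) := by
  induction ets with
  | nil => intro d num; simp [PySem.List.enumerate_nil]
  | cons t ts ih =>
    intro d num
    simp only [List.foldl_cons, hg, ih, List.flatMap_cons,
      PySem.List.enumerate_append, List.foldl_append, List.length_append, Prod.mk.injEq]
    exact ⟨by trivial, by push_cast; ring⟩

theorem pv_foldl_id {α β : Type} (l : List β) (x : α) :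
    List.foldl (fun st (_ : β) => st) x l = x := by
  induction l generalizing x <;> simp_all

theorem pv_flatMap_nil (ets : List String) :
    List.flatMap (fun _ : String => ([] : List String)) ets = [] := by
  induction ets <;> simp_all

-- ===== VERDICT (by name: the statement is the Claim_ definition above) =====
theorem generate_labels_dict_spec : Claim_equal_generate_labels_dict := by
  intro entity_types way _
  show generate_labels_dict entity_types way = generate_labels_dict_alt entity_types way
  by_cases h1 : way = "bio"
  · subst h1
    show ((entity_types.foldl (fun (st : PySem.Dict String Int × Int) entity_type =>
        ((st.1.insert ("B-" ++ entity_type) st.2).insert ("I-" ++ entity_type) (st.2 + 1),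
          st.2 + 1 + 1)) (PySem.Dict.empty.insert "O" 0, 1)).1).items
      = ((PySem.List.enumerate ("O" :: entity_types.flatMap (fun t =>
          ["B-" ++ t, "I-" ++ t]))).foldl
          (fun (d : PySem.Dict String Int) p => d.insert p.2 p.1) PySem.Dict.empty).items
    rw [pv_fold_eq (fun t => ["B-" ++ t, "I-" ++ t])
        (fun st entity_type =>
          ((st.1.insert ("B-" ++ entity_type) st.2).insert ("I-" ++ entity_type) (st.2 + 1),
            st.2 + 1 + 1))
        (by intro d num t
            simp only [PySem.List.enumerate_cons, PySem.List.enumerate_nil, List.foldl_cons,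
              List.foldl_nil, List.length_cons, List.length_nil, Prod.mk.injEq]
            exact ⟨by trivial, by push_cast; ring⟩)]
    simp only [PySem.List.enumerate_cons, List.foldl_cons, zero_add]
  · by_cases h2 : way = "bioes"
    · subst h2
      show ((entity_types.foldl (fun (st : PySem.Dict String Int × Int) entity_type =>
          ((((st.1.insert ("B-" ++ entity_type) st.2).insert ("I-" ++ entity_type) (st.2 + 1)).insert
              ("E-" ++ entity_type) (st.2 + 1 + 1)).insert ("S-" ++ entity_type) (st.2 + 1 + 1 + 1),
            st.2 + 1 + 1 + 1 + 1)) (PySem.Dict.empty.insert "O" 0, 1)).1).items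
        = ((PySem.List.enumerate ("O" :: entity_types.flatMap (fun t =>
            ["B-" ++ t, "I-" ++ t, "E-" ++ t, "S-" ++ t]))).foldl
            (fun (d : PySem.Dict String Int) p => d.insert p.2 p.1) PySem.Dict.empty).items
      rw [pv_fold_eq (fun t => ["B-" ++ t, "I-" ++ t, "E-" ++ t, "S-" ++ t])
          (fun st entity_type =>
            ((((st.1.insert ("B-" ++ entity_type) st.2).insert ("I-" ++ entity_type) (st.2 + 1)).insert
                ("E-" ++ entity_type) (st.2 + 1 + 1)).insert ("S-" ++ entity_type) (st.2 + 1 + 1 + 1),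
              st.2 + 1 + 1 + 1 + 1))
          (by intro d num t
              simp only [PySem.List.enumerate_cons, PySem.List.enumerate_nil, List.foldl_cons,
                List.foldl_nil, List.length_cons, List.length_nil, Prod.mk.injEq]
              refine ⟨by norm_num, by push_cast; ring⟩)]
      simp only [PySem.List.enumerate_cons, List.foldl_cons, zero_add]
    · by_cases h3 : way = "bmes"
      · subst h3
        show ((entity_types.foldl (fun (st : PySem.Dict String Int × Int) entity_type =>
            ((((st.1.insert ("B-" ++ entity_type) st.2).insert ("M-" ++ entity_type) (st.2 + 1)).insert
                ("E-" ++ entity_type) (st.2 + 1 + 1)).insert ("S-" ++ entity_type) (st.2 + 1 + 1 + 1),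
              st.2 + 1 + 1 + 1 + 1)) (PySem.Dict.empty.insert "O" 0, 1)).1).items
          = ((PySem.List.enumerate ("O" :: entity_types.flatMap (fun t =>
              ["B-" ++ t, "M-" ++ t, "E-" ++ t, "S-" ++ t]))).foldl
              (fun (d : PySem.Dict String Int) p => d.insert p.2 p.1) PySem.Dict.empty).items
        rw [pv_fold_eq (fun t => ["B-" ++ t, "M-" ++ t, "E-" ++ t, "S-" ++ t])
            (fun st entity_type =>
              ((((st.1.insert ("B-" ++ entity_type) st.2).insert ("M-" ++ entity_type) (st.2 + 1)).insert
                  ("E-" ++ entity_type) (st.2 + 1 + 1)).insert ("S-" ++ entity_type) (st.2 + 1 + 1 + 1),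
                st.2 + 1 + 1 + 1 + 1))
            (by intro d num t
                simp only [PySem.List.enumerate_cons, PySem.List.enumerate_nil, List.foldl_cons,
                  List.foldl_nil, List.length_cons, List.length_nil, Prod.mk.injEq]
                refine ⟨by norm_num, by push_cast; ring⟩)]
        simp only [PySem.List.enumerate_cons, List.foldl_cons, zero_add]
      · unfold generate_labels_dict generate_labels_dict_alt
        have b1 : (("bio" : String) == way) = false := by simpa using Ne.symm h1
        have b2 : (("bioes" : String) == way) = false := by simpa using Ne.symm h2
        have b3 : (("bmes" : String) == way) = false := by simpa using Ne.symm h3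
        have hp : pvPrefixChars.getD way "" = "" := by
          have hmk : pvPrefixChars = PySem.Dict.mk
              [("bio", "BI"), ("bioes", "BIES"), ("bmes", "BMES")] := rfl
          simp only [hmk, PySem.Dict.getD_eq_get?_getD, PySem.Dict.get?_mk_cons, b1, b2, b3]
          rfl
        simp only [hp, h1, h2, h3, if_false, beq_iff_eq,
          PySem.List.enumerate_cons, List.foldl_cons]
        have h0 : ("" : String).toList = [] := rfl
        simp only [h0, List.map_nil, pv_flatMap_nil, PySem.List.enumerate_nil, List.foldl_nil,
          pv_foldl_id]
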